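-- pv_equiv track=rewrite | github.com/MarkCarbonell98/UniSecondSemester | mathematik_fur_informatiker/ubungen/ubung1/ubung1.1c.py | findWeight
-- ===== SOURCE A (Python) =====
-- def findWeight(x, limit = 100):
--     allWeights = [3**num for num in range(limit)]
--     result, i= [], 0
--     while(sum(result) != x):
--         if 2*allWeights[i] >= x and sum(result) != x:
--             for j in range(i, -1,-1):
--                 if(sum(result) == x): return result
--                 if 2*allWeights[j] + sum(result) <= x and sum(result) <= x:
--                     result.append(allWeights[j])
--                     result.append(allWeights[j])
--                 elif allWeights[j] + sum(result) <= x and sum(result) <= x: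
--                     result.append(allWeights[j])
--         i += 1
--     return result
-- ===== SOURCE B (Python) =====
-- def findWeight(x, limit = 100):
--     # Base-3 digit expansion: collect digits low-to-high, then emit each
--     # power of 3 digit-many times from high to low.  O(log x), no list of
--     # 'limit' powers and no repeated sum() passes.
--     if x == 0:
--         return []
--     digits = []
--     n = x
--     while n > 0:
--         digits.append(n % 3)
--         n //= 3
--     result = []
--     for j in range(len(digits) - 1, -1, -1):
--         result.extend([3 ** j] * digits[j])
--     return result
-- ===== Notes on version B (the rewrite author's own statement) =====
-- stated objective: faster
-- what changed: Replaced the O(limit)-size power table and the quadratic greedy loop with repeated sum(result) passes by a direct base-3 digit expansion of x emitted high-to-low.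
import Mathlib
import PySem

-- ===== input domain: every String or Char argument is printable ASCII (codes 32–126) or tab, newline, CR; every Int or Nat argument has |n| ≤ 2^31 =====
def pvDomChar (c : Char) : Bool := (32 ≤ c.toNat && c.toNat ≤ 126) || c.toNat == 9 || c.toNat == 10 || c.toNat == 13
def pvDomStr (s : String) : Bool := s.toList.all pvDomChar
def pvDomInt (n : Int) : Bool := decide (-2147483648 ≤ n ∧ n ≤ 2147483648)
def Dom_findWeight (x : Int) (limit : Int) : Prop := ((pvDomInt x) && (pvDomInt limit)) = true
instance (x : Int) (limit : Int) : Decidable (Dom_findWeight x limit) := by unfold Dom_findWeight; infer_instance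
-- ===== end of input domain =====

-- B replaces A's power table + quadratic greedy loop (repeated sum passes) by a direct
-- base-3 digit expansion of x emitted high-to-low (objective: faster).

-- ===== PORT A =====
-- allWeights = [3**num for num in range(limit)]
def pvAW (limit : Int) : List Int :=
  (PySem.List.pyRange 0 limit 1).map (fun num => (3 : Int) ^ num.toNat)

-- one body of A's inner 'for j in range(i, -1, -1)' loop (Python's early
-- 'return result' is modelled by leaving result unchanged once sum(result) == x,
-- which later iterations then also leave unchanged — same returned value)
def pvStepA (aw : List Int) (x : Int) (j : Nat) (result : List Int) : List Int :=
  if result.sum = x then result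
  else
    let w := PySem.List.pyGetD aw (j : Int) 0   -- in range whenever A returns (j ≤ i < len aw)
    if 2 * w + result.sum ≤ x ∧ result.sum ≤ x then result ++ [w, w]
    else if w + result.sum ≤ x ∧ result.sum ≤ x then result ++ [w]
    else result

-- A's inner loop, j counting down from i to 0
def pvInnerA (aw : List Int) (x : Int) : Nat → List Int → List Int
  | 0, result => pvStepA aw x 0 result
  | j + 1, result => pvInnerA aw x j (pvStepA aw x (j + 1) result)

-- A's 'while sum(result) != x' loop; fuel only makes it total (A diverges for x < 0,
-- outside Pre_); none from pyGet? is A's IndexError (outside Pre_)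
def pvWhileA (aw : List Int) (x : Int) : Nat → Nat → List Int → List Int
  | 0, _, result => result
  | fuel + 1, i, result =>
    if result.sum = x then result
    else
      match PySem.List.pyGet? aw (i : Int) with
      | none => result
      | some w =>
        let result' := if 2 * w ≥ x ∧ result.sum ≠ x then pvInnerA aw x i result else result
        pvWhileA aw x fuel (i + 1) result'

def findWeight (x : Int) (limit : Int) : List Int :=
  let allWeights := pvAW limit
  pvWhileA allWeights x (allWeights.length + 1) 0 []

-- ===== PORT B =====
-- B's 'while n > 0: digits.append(n % 3); n //= 3' (the loop only runs for n > 0,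
-- so the Nat argument is exact; findWeight_alt passes x.toNat, see there)
def pvDigits3 (n : Nat) : List Int :=
  if h : n = 0 then [] else ((n % 3 : Nat) : Int) :: pvDigits3 (n / 3)
  decreasing_by exact Nat.div_lt_self (Nat.pos_of_ne_zero h) (by omega)

-- B's 'for j in range(len(digits)-1, -1, -1): result.extend([3**j]*digits[j])'
def pvEmitB (digits : List Int) : Nat → List Int → List Int
  | 0, result => result ++ List.replicate (digits.getD 0 0).toNat ((3 : Int) ^ (0 : Nat))
  | j + 1, result =>
    pvEmitB digits j (result ++ List.replicate (digits.getD (j + 1) 0).toNat ((3 : Int) ^ (j + 1)))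

def findWeight_alt (x : Int) (limit : Int) : List Int :=
  if x = 0 then []
  else
    let digits := pvDigits3 x.toNat   -- for x < 0 Python's while-loop runs 0 times: digits = []
    if digits.isEmpty then []         -- Python's range(-1, -1, -1) is empty: result stays []
    else pvEmitB digits (digits.length - 1) []

-- ===== PRECONDITION & SPEC =====
-- Exactly the inputs (inside Dom) on which Python's A returns: A loops forever for x < 0
-- and raises IndexError for x > 2*3^(limit-1); 'min limit 20' only keeps the power
-- computable — within Dom, x ≤ 2^31 < 2*3^19, so nothing A returns on is excluded.
def Pre_findWeight (x : Int) (limit : Int) : Prop :=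
  0 ≤ x ∧ (x = 0 ∨ (1 ≤ limit ∧ x ≤ 2 * 3 ^ ((min limit 20).toNat - 1)))
instance (x : Int) (limit : Int) : Decidable (Pre_findWeight x limit) := by
  unfold Pre_findWeight; infer_instance
def pvWitness_findWeight : Int × Int := (7, 100)

def Spec_findWeight (x : Int) (limit : Int) (out : List Int) : Prop := out = findWeight_alt x limit
instance (x : Int) (limit : Int) (out : List Int) : Decidable (Spec_findWeight x limit out) := by
  unfold Spec_findWeight; infer_instance

-- ===== CLAIM (what is proved, stated in full; the proofs are below) =====
def Claim_equal_findWeight : Prop := ∀ (x : Int) (limit : Int), Dom_findWeight x limit → Pre_findWeight x limit → Spec_findWeight x limit (findWeight x limit)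

-- ===== LEMMAS AND PROOFS =====

-- canonical value: digits of r in base 3 from position j down to 0, high to low
def pvC : Nat → Int → List Int
  | 0, r => List.replicate r.toNat 1
  | j + 1, r =>
    List.replicate (r / 3 ^ (j + 1)).toNat ((3 : Int) ^ (j + 1)) ++ pvC j (r % 3 ^ (j + 1))

-- division brackets
lemma pv_ediv_two {r p : Int} (hp : 0 < p) (h1 : 2*p ≤ r) (h2 : r < 3*p) : r / p = 2 := by
  have h3 : 2 ≤ r / p := by rw [Int.le_ediv_iff_mul_le hp]; omega
  have h4 : r / p < 3 := by rw [Int.ediv_lt_iff_lt_mul hp]; omega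
  omega
lemma pv_ediv_one {r p : Int} (hp : 0 < p) (h1 : p ≤ r) (h2 : r < 2*p) : r / p = 1 := by
  have h3 : 1 ≤ r / p := by rw [Int.le_ediv_iff_mul_le hp]; omega
  have h4 : r / p < 2 := by rw [Int.ediv_lt_iff_lt_mul hp]; omega
  omega

-- the power table
lemma pv_aw_getD (limit : Int) (k : Nat) (hk : (k:Int) < limit) :
    PySem.List.pyGetD (pvAW limit) (k : Int) 0 = 3 ^ k := by
  rw [pvAW, PySem.List.pyGetD_map_pyRange_of_nonneg _ _ _ _ (by positivity) (by simpa using hk)]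
  simp
lemma pv_aw_get? (limit : Int) (k : Nat) (hk : (k:Int) < limit) :
    PySem.List.pyGet? (pvAW limit) (k : Int) = some (3 ^ k) := by
  have hlen : k < (pvAW limit).length := by
    simp [pvAW, PySem.List.length_pyRange_one]; omega
  rw [pvAW] at hlen ⊢
  rw [PySem.List.pyGet?_natCast, List.getElem?_eq_getElem hlen]
  simp [PySem.List.getElem_pyRange_one]
lemma pv_aw_len (limit : Int) : (pvAW limit).length = limit.toNat := by
  simp [pvAW, PySem.List.length_pyRange_one]

-- A's inner loop produces the base-3 digits of the remainder, high to low
lemma pv_inner_eq (limit x : Int) : ∀ (j : Nat) (result : List Int), (j:Int) < limit →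
    0 ≤ x - result.sum → x - result.sum < 3^(j+1) →
    pvInnerA (pvAW limit) x j result = result ++ pvC j (x - result.sum) := by
  intro j
  induction j with
  | zero =>
    intro result hj h0 hub
    rw [pvInnerA, pvStepA, pv_aw_getD limit 0 hj]
    simp only [pow_zero] at *
    rcases (by omega : x - result.sum = 0 ∨ x - result.sum = 1 ∨ x - result.sum = 2) with h | h | h
    · rw [if_pos (by omega), pvC, h]; simp
    · rw [if_neg (by omega), if_neg (by omega), if_pos (by omega), pvC, h]; rfl
    · rw [if_neg (by omega), if_pos (by omega), pvC, h]; rfl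
  | succ j ih =>
    intro result hj h0 hub
    have hp : (0:Int) < 3 ^ (j+1) := by positivity
    have hj' : ((j:Nat) : Int) < limit := by push_cast at hj ⊢; omega
    rw [pvInnerA, pvStepA, pv_aw_getD limit (j+1) hj]
    set p : Int := 3 ^ (j+1) with hpdef
    have h3p : x - result.sum < 3 * p := by
      have : (3:Int) ^ (j+1+1) = 3 * p := by rw [hpdef, pow_succ]; ring
      omega
    by_cases hz : result.sum = x
    · rw [if_pos hz]
      rw [ih result hj' h0 (by omega)]
      have hr0 : x - result.sum = 0 := by omega
      rw [hr0, pvC]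
      simp
    · rw [if_neg hz]
      by_cases h2 : 2 * p ≤ x - result.sum
      · rw [if_pos (by constructor <;> omega)]
        rw [ih (result ++ [p, p]) hj' (by simp; omega) (by simp; omega)]
        rw [pvC, ← hpdef]
        rw [pv_ediv_two hp h2 h3p]
        rw [Int.emod_def, pv_ediv_two hp h2 h3p]
        simp
        congr 1
        omega
      · by_cases h1 : p ≤ x - result.sum
        · rw [if_neg (by omega), if_pos (by constructor <;> omega)]
          rw [ih (result ++ [p]) hj' (by simp; omega) (by simp; omega)]
          rw [pvC, ← hpdef]
          rw [pv_ediv_one hp h1 (by omega)]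
          rw [Int.emod_def, pv_ediv_one hp h1 (by omega)]
          simp
          congr 1
          omega
        · rw [if_neg (by omega), if_neg (by omega)]
          rw [ih result hj' h0 (by omega)]
          rw [pvC, ← hpdef]
          rw [Int.ediv_eq_zero_of_lt h0 (by omega)]
          rw [Int.emod_eq_of_lt h0 (by omega)]
          simp

lemma pv_pvC_sum : ∀ (j : Nat) (r : Int), 0 ≤ r → r < 3^(j+1) → (pvC j r).sum = r := by
  intro j
  induction j with
  | zero =>
    intro r h0 hub
    rw [pvC]
    simp
    omega
  | succ j ih =>
    intro r h0 hub
    have hp : (0:Int) < 3 ^ (j+1) := by positivity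
    rw [pvC]
    have hd0 : 0 ≤ r / 3 ^ (j+1) := Int.ediv_nonneg h0 (by positivity)
    have hm0 : 0 ≤ r % 3 ^ (j+1) := Int.emod_nonneg r (by positivity)
    have hmlt : r % 3 ^ (j+1) < 3 ^ (j+1) := Int.emod_lt_of_pos r hp
    rw [List.sum_append, ih _ hm0 hmlt]
    simp [List.sum_replicate]
    rw [max_eq_left hd0, mul_comm]
    exact Int.mul_ediv_add_emod r _

lemma pv_pvC_step (j : Nat) (r : Int) (h0 : 0 ≤ r) (hub : r < 3^(j+1)) :
    pvC (j+1) r = pvC j r := by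
  rw [pvC, Int.ediv_eq_zero_of_lt h0 hub, Int.emod_eq_of_lt h0 hub]
  simp

lemma pv_pvC_high : ∀ (k j : Nat) (r : Int), j ≤ k → 0 ≤ r → r < 3^(j+1) → pvC k r = pvC j r := by
  intro k
  induction k with
  | zero => intro j r hj _ _; interval_cases j; rfl
  | succ k ih =>
    intro j r hj h0 hub
    rcases Nat.eq_or_lt_of_le hj with h | h
    · rw [h]
    · have hjk : j ≤ k := by omega
      rw [pv_pvC_step k r h0 (by
        calc r < 3^(j+1) := hub
        _ ≤ 3^(k+1) := pow_le_pow_right₀ (by omega) (by omega))]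
      exact ih j r hjk h0 hub

-- the first iteration of A's while-loop whose condition fires produces the whole answer
lemma pv_while_hit (limit x : Int) (i fuel : Nat) (hi : (i:Int) < limit) (hx : 0 < x)
    (hub : x ≤ 2 * 3 ^ i) :
    pvWhileA (pvAW limit) x (fuel + 2) i [] = pvC i x := by
  have h3 : x < 3 ^ (i+1) := by
    have : (3:Int) ^ (i+1) = 3 * 3 ^ i := by rw [pow_succ]; ring
    have hp : (0:Int) < 3 ^ i := by positivity
    omega
  rw [pvWhileA]
  rw [if_neg (by simp; omega), pv_aw_get? limit i hi]
  simp only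
  rw [if_pos ⟨by omega, by simp; omega⟩]
  rw [pv_inner_eq limit x i [] hi (by simp; omega) (by simp; omega)]
  simp only [List.nil_append, List.sum_nil, sub_zero]
  rw [pvWhileA]
  rw [if_pos (pv_pvC_sum i x (by omega) h3)]

-- running A's while-loop from i with an empty accumulator, d more indices available
lemma pv_while_run (limit x : Int) (hx : 0 < x) : ∀ (d i : Nat), (i:Int) + d < limit →
    x ≤ 2 * 3 ^ (i + d) →
    pvWhileA (pvAW limit) x (d + 2) i [] = pvC (i + d) x := by
  intro d
  induction d with
  | zero =>
    intro i hlt hub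
    exact pv_while_hit limit x i 0 (by omega) hx (by simpa using hub)
  | succ d ih =>
    intro i hlt hub
    by_cases hhit : 2 * 3 ^ i ≥ x
    · have h3 : x < 3 ^ (i+1) := by
        have : (3:Int) ^ (i+1) = 3 * 3 ^ i := by rw [pow_succ]; ring
        have hp : (0:Int) < 3 ^ i := by positivity
        omega
      rw [show d + 1 + 2 = (d + 1) + 2 from rfl,
        pv_while_hit limit x i (d+1) (by omega) hx hhit]
      exact (pv_pvC_high (i + (d+1)) i x (by omega) (by omega) h3).symm
    · rw [pvWhileA]
      rw [if_neg (by simp; omega), pv_aw_get? limit i (by omega)]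
      simp only
      rw [if_neg (by intro h; exact hhit h.1)]
      have := ih (i+1) (by push_cast at hlt ⊢; omega) (by
        have : i + 1 + d = i + (d + 1) := by omega
        rw [this]; exact hub)
      rw [this]
      congr 1
      omega

-- B's digit list: digits of n in base 3, low to high
lemma pv_digits_getD : ∀ (n : Nat) (j : Nat), (pvDigits3 n).getD j 0 = ((n / 3 ^ j % 3 : Nat) : Int) := by
  intro n
  induction n using Nat.strong_induction_on with
  | _ n ih =>
    intro j
    rw [pvDigits3]
    by_cases h : n = 0
    · simp [h]
    · rw [dif_neg h]
      cases j with
      | zero => simp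
      | succ j =>
        rw [List.getD_cons_succ, ih (n / 3) (Nat.div_lt_self (Nat.pos_of_ne_zero h) (by omega)) j]
        rw [Nat.div_div_eq_div_mul]
        congr 2
        rw [pow_succ']

lemma pv_digits_len_ub : ∀ n : Nat, n < 3 ^ (pvDigits3 n).length := by
  intro n
  induction n using Nat.strong_induction_on with
  | _ n ih =>
    rw [pvDigits3]
    by_cases h : n = 0
    · simp [h]
    · rw [dif_neg h]
      have := ih (n / 3) (Nat.div_lt_self (Nat.pos_of_ne_zero h) (by omega))
      simp only [List.length_cons, pow_succ]
      omega

lemma pv_digits_len_lb : ∀ n : Nat, n ≠ 0 → 3 ^ ((pvDigits3 n).length - 1) ≤ n := by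
  intro n
  induction n using Nat.strong_induction_on with
  | _ n ih =>
    intro h
    rw [pvDigits3, dif_neg h]
    by_cases h3 : n / 3 = 0
    · rw [pvDigits3, dif_pos h3]
      simp
      omega
    · have hlt := Nat.div_lt_self (Nat.pos_of_ne_zero h) (by omega : (1:Nat) < 3)
      have := ih (n / 3) hlt h3
      have hlen : (pvDigits3 (n / 3)).length ≠ 0 := by
        rw [pvDigits3, dif_neg h3]; simp
      simp only [List.length_cons]
      have h1 : (pvDigits3 (n / 3)).length - 1 + 1 = (pvDigits3 (n / 3)).length := by omega
      have : 3 ^ ((pvDigits3 (n / 3)).length - 1 + 1) ≤ 3 * (n / 3) := by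
        rw [pow_succ]
        omega
      rw [h1] at this
      simp only [Nat.add_sub_cancel]
      omega

-- B's emit loop produces pvC of the truncated value
lemma pv_emit_eq (n : Nat) : ∀ (j : Nat) (result : List Int),
    pvEmitB (pvDigits3 n) j result = result ++ pvC j ((n : Int) % 3 ^ (j + 1)) := by
  intro j
  induction j with
  | zero =>
    intro result
    rw [pvEmitB, pv_digits_getD n 0, pvC]
    congr 2
    omega
  | succ j ih =>
    intro result
    rw [pvEmitB, ih, pv_digits_getD n (j+1), pvC, ← List.append_assoc]
    have hdvd : ((3:Int) ^ (j + 1)) ∣ 3 ^ (j + 1 + 1) := pow_dvd_pow 3 (by omega)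
    rw [Int.emod_emod_of_dvd _ hdvd]
    have h2 : n % 3 ^ (j + 2) / 3 ^ (j + 1) = n / 3 ^ (j + 1) % 3 := by
      have h3 : (3:Nat) ^ (j + 2) = 3 ^ (j + 1) * 3 := by rw [pow_succ]
      rw [h3, Nat.mod_mul_right_div_self]
    have h1 : (n : Int) % 3 ^ (j + 1 + 1) / 3 ^ (j + 1) = ((n % 3 ^ (j + 2) / 3 ^ (j + 1) : Nat) : Int) := by
      push_cast
      rfl
    congr 3
    rw [h1, h2]

lemma pv_digits_ne_nil (n : Nat) (h : n ≠ 0) : pvDigits3 n ≠ [] := by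
  rw [pvDigits3, dif_neg h]; simp

-- B on positive x: the base-3 digits of x, high to low
lemma pv_alt_eq (x limit : Int) (hx : 0 < x) :
    findWeight_alt x limit = pvC ((pvDigits3 x.toNat).length - 1) x := by
  have hn : x.toNat ≠ 0 := by omega
  have hne := pv_digits_ne_nil x.toNat hn
  rw [findWeight_alt, if_neg (by omega)]
  simp only [List.isEmpty_iff, hne]
  rw [pv_emit_eq x.toNat ((pvDigits3 x.toNat).length - 1) []]
  have hlen : (pvDigits3 x.toNat).length - 1 + 1 = (pvDigits3 x.toNat).length := by
    have : (pvDigits3 x.toNat).length ≠ 0 := by simpa [List.length_eq_zero_iff] using hne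
    omega
  rw [hlen]
  have hub := pv_digits_len_ub x.toNat
  have hmod : (x.toNat : Int) % 3 ^ (pvDigits3 x.toNat).length = (x.toNat : Int) := by
    apply Int.emod_eq_of_lt (by omega)
    exact_mod_cast hub
  rw [hmod]
  simp [Int.toNat_of_nonneg (by omega : (0:Int) ≤ x)]

lemma pv_findWeight_eq (x limit : Int) :
    findWeight x limit = pvWhileA (pvAW limit) x ((pvAW limit).length + 1) 0 [] := rfl

lemma pv_main (x limit : Int) (hpre : Pre_findWeight x limit) :
    findWeight x limit = findWeight_alt x limit := by
  obtain ⟨hx0, hcase⟩ := hpre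
  by_cases hx : x = 0
  · subst hx
    rw [pv_findWeight_eq, pvWhileA, if_pos (by simp)]
    rw [findWeight_alt, if_pos rfl]
  · have hxpos : 0 < x := by omega
    obtain ⟨hl1, hub⟩ : 1 ≤ limit ∧ x ≤ 2 * 3 ^ ((min limit 20).toNat - 1) := by
      rcases hcase with h | h
      · omega
      · exact h
    have hL1 : 1 ≤ limit.toNat := by omega
    have hmL : (min limit 20).toNat - 1 ≤ limit.toNat - 1 := by omega
    have hub' : x ≤ 2 * 3 ^ (limit.toNat - 1) := by
      calc x ≤ 2 * 3 ^ ((min limit 20).toNat - 1) := hub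
      _ ≤ 2 * 3 ^ (limit.toNat - 1) := by
          have := pow_le_pow_right₀ (by omega : (1:Int) ≤ 3) hmL
          omega
    have hrun := pv_while_run limit x hxpos (limit.toNat - 1) 0
      (by push_cast; omega) (by simpa using hub')
    rw [pv_findWeight_eq, pv_aw_len]
    rw [show limit.toNat + 1 = (limit.toNat - 1) + 2 by omega]
    rw [hrun]
    rw [pv_alt_eq x limit hxpos]
    -- connect the two digit counts
    have hubN := pv_digits_len_ub x.toNat
    have hlbN := pv_digits_len_lb x.toNat (by omega)
    have hxL : x < 3 ^ limit.toNat := by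
      have h3 : (3:Int) ^ limit.toNat = 3 * 3 ^ (limit.toNat - 1) := by
        rw [← pow_succ']
        congr 1
        omega
      have : (0:Int) < 3 ^ (limit.toNat - 1) := by positivity
      omega
    have hlenL : (pvDigits3 x.toNat).length - 1 ≤ limit.toNat - 1 := by
      have hxLN : x.toNat < 3 ^ limit.toNat := by
        have hcast : ((3 ^ limit.toNat : Nat) : Int) = 3 ^ limit.toNat := by push_cast; rfl
        rw [← hcast] at hxL
        omega
      have : 3 ^ ((pvDigits3 x.toNat).length - 1) < 3 ^ limit.toNat := by omega
      have := (Nat.pow_lt_pow_iff_right (by omega : 1 < 3)).mp this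
      omega
    have hxlen : x < 3 ^ ((pvDigits3 x.toNat).length - 1 + 1) := by
      have hne := pv_digits_ne_nil x.toNat (by omega)
      have hl : (pvDigits3 x.toNat).length ≠ 0 := by simpa [List.length_eq_zero_iff] using hne
      rw [show (pvDigits3 x.toNat).length - 1 + 1 = (pvDigits3 x.toNat).length by omega]
      calc x = (x.toNat : Int) := by omega
      _ < (3 ^ (pvDigits3 x.toNat).length : Nat) := by exact_mod_cast hubN
      _ = (3:Int) ^ (pvDigits3 x.toNat).length := by push_cast; rfl
    rw [show (0:Nat) + (limit.toNat - 1) = limit.toNat - 1 by omega]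
    exact pv_pvC_high (limit.toNat - 1) ((pvDigits3 x.toNat).length - 1) x hlenL (by omega) hxlen

-- ===== VERDICT (by name: the statement is the Claim_ definition above) =====
theorem findWeight_spec : Claim_equal_findWeight := by
  intro x limit _ hpre
  exact pv_main x limit hpre
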